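-- pv_equiv track=rewrite | github.com/15990187550/novel-dev | src/novel_dev/services/extraction_service.py | _domain_scope_from_entity_diff
-- ===== SOURCE A (Python) =====
-- from typing import Any, List, Optional
--
-- def _domain_scope_from_entity_diff(entity_diff: dict[str, Any]) -> tuple[str | None, str | None]:
--     domain_id = None
--     domain_name = None
--     for change in entity_diff.get("field_changes", []):
--         if change.get("field") == "_knowledge_domain_id":
--             domain_id = change.get("new_value")
--         elif change.get("field") == "_knowledge_domain_name":
--             domain_name = change.get("new_value")
--     return domain_id, domain_name
-- ===== SOURCE B (Python) =====
-- def _domain_scope_from_entity_diff(entity_diff):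
--     changes = entity_diff.get("field_changes", [])
--
--     def last_value(field):
--         # Scan backwards: the first match from the end is the last occurrence.
--         for change in reversed(changes):
--             if change.get("field") == field:
--                 return change.get("new_value")
--         return None
--
--     return last_value("_knowledge_domain_id"), last_value("_knowledge_domain_name")
-- ===== Notes on version B (the rewrite author's own statement) =====
-- stated objective: alternative
-- what changed: Replaces A's single forward pass that accumulates both slots with two independent backward scans that early-return the first match from the end (last occurrence wins), so no accumulator state is kept.
import Mathlib
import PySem

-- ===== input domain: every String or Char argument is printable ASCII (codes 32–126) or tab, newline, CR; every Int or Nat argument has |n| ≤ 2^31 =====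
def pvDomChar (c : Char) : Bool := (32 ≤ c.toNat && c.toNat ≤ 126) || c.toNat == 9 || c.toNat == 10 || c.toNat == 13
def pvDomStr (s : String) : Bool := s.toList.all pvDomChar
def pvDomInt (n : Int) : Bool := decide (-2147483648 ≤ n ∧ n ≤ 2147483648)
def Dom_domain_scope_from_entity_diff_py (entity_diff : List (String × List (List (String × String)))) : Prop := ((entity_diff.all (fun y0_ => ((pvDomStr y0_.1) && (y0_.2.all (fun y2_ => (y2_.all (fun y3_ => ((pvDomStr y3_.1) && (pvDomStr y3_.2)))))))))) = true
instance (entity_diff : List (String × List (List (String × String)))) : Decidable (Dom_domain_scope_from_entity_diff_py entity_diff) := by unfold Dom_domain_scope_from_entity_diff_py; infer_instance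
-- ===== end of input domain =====

-- B replaces A's forward accumulator loop by two backward early-return scans (alternative decomposition; same cost).

-- ===== PORT A =====
-- A: one forward scan over field_changes, updating the matching slot of (domain_id, domain_name).
def domain_scope_from_entity_diff_py (entity_diff : List (String × List (List (String × String)))) : Option String × Option String :=
  ((PySem.Dict.mk entity_diff).getD "field_changes" []).foldl
    (fun (st : Option String × Option String) change =>
      if (PySem.Dict.mk change).get? "field" = some "_knowledge_domain_id" then
        ((PySem.Dict.mk change).get? "new_value", st.2)
      else if (PySem.Dict.mk change).get? "field" = some "_knowledge_domain_name" then
        (st.1, (PySem.Dict.mk change).get? "new_value")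
      else st)
    (none, none)

-- ===== PORT B =====
-- B helper: scan the changes backwards, returning new_value of the first match from the end (Python's
-- 'for … in reversed(changes): if …: return' is exactly find? on the reversed list).
def pvLastValue (changes : List (List (String × String))) (field : String) : Option String :=
  match changes.reverse.find? (fun c => (PySem.Dict.mk c).get? "field" == some field) with
  | some c => (PySem.Dict.mk c).get? "new_value"
  | none => none

def domain_scope_from_entity_diff_py_alt (entity_diff : List (String × List (List (String × String)))) : Option String × Option String :=
  let changes := (PySem.Dict.mk entity_diff).getD "field_changes" []
  (pvLastValue changes "_knowledge_domain_id", pvLastValue changes "_knowledge_domain_name")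

-- ===== PRECONDITION & SPEC =====
def Spec_domain_scope_from_entity_diff_py (entity_diff : List (String × List (List (String × String)))) (out : Option String × Option String) : Prop := out = domain_scope_from_entity_diff_py_alt entity_diff
instance (entity_diff : List (String × List (List (String × String)))) (out : Option String × Option String) : Decidable (Spec_domain_scope_from_entity_diff_py entity_diff out) := by unfold Spec_domain_scope_from_entity_diff_py; infer_instance

-- ===== CLAIM (what is proved, stated in full; the proofs are below) =====
def Claim_equal_domain_scope_from_entity_diff_py : Prop := ∀ (entity_diff : List (String × List (List (String × String)))), Dom_domain_scope_from_entity_diff_py entity_diff → Spec_domain_scope_from_entity_diff_py entity_diff (domain_scope_from_entity_diff_py entity_diff)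

-- ===== LEMMAS AND PROOFS =====

-- Invariant: A's forward fold from any start state equals, componentwise, B's backward first-match
-- (with the start state as the not-found default).
theorem pv_loop_eq (cs : List (List (String × String))) (st : Option String × Option String) :
    cs.foldl
      (fun (st : Option String × Option String) change =>
        if (PySem.Dict.mk change).get? "field" = some "_knowledge_domain_id" then
          ((PySem.Dict.mk change).get? "new_value", st.2)
        else if (PySem.Dict.mk change).get? "field" = some "_knowledge_domain_name" then
          (st.1, (PySem.Dict.mk change).get? "new_value")
        else st)
      st
    =
    ((match cs.reverse.find? (fun c => (PySem.Dict.mk c).get? "field" == some "_knowledge_domain_id") with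
      | some c => (PySem.Dict.mk c).get? "new_value"
      | none => st.1),
     (match cs.reverse.find? (fun c => (PySem.Dict.mk c).get? "field" == some "_knowledge_domain_name") with
      | some c => (PySem.Dict.mk c).get? "new_value"
      | none => st.2)) := by
  induction cs generalizing st with
  | nil => simp
  | cons c cs ih =>
    simp only [List.foldl_cons, List.reverse_cons, List.find?_append]
    rw [ih]
    rcases h1 : cs.reverse.find? (fun c => (PySem.Dict.mk c).get? "field" == some "_knowledge_domain_id") with _ | c1 <;>
    rcases h2 : cs.reverse.find? (fun c => (PySem.Dict.mk c).get? "field" == some "_knowledge_domain_name") with _ | c2 <;>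
    simp only [List.find?_singleton] <;>
    by_cases g1 : (PySem.Dict.mk c).get? "field" = some "_knowledge_domain_id" <;>
    by_cases g2 : (PySem.Dict.mk c).get? "field" = some "_knowledge_domain_name" <;>
    simp_all

-- ===== VERDICT (by name: the statement is the Claim_ definition above) =====
theorem domain_scope_from_entity_diff_py_spec : Claim_equal_domain_scope_from_entity_diff_py := by
  intro entity_diff _
  unfold Spec_domain_scope_from_entity_diff_py domain_scope_from_entity_diff_py domain_scope_from_entity_diff_py_alt pvLastValue
  exact pv_loop_eq _ (none, none)
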